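-- pv_equiv track=rewrite | github.com/B4ethan/4InArow | mainWithDebugging.py | checkStreakOf4
-- ===== SOURCE A (Python) =====
-- def checkStreakOf4(partOfBoard, gamePiece):
--     streak = 0
--     for cell in partOfBoard:
--         if cell == gamePiece:
--             streak += 1
--             if streak == 4:
--                 return True
--         else:
--             streak = 0
--     return False
-- ===== SOURCE B (Python) =====
-- def checkStreakOf4(partOfBoard, gamePiece):
--     # window scan: is any 4-long slice entirely the game piece?
--     target = [gamePiece] * 4
--     return any(partOfBoard[i:i + 4] == target
--                for i in range(len(partOfBoard) - 3))
-- ===== Notes on version B (the rewrite author's own statement) =====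
-- stated objective: alternative
-- what changed: Replaces the incremental reset-counter streak loop with a sliding-window scan that compares each 4-long slice against [gamePiece]*4.
import Mathlib
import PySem

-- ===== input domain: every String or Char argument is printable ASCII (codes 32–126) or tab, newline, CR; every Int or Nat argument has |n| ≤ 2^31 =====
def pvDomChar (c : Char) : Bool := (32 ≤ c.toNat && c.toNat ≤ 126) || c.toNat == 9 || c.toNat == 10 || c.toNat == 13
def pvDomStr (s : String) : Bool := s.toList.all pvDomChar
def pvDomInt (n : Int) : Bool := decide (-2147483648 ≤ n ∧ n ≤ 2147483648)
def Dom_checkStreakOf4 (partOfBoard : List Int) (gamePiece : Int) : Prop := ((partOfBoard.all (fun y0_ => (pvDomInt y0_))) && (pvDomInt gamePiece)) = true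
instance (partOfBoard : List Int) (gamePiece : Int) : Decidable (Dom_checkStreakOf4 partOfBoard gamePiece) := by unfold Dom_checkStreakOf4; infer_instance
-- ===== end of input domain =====

-- B replaces A's incremental reset-counter streak loop by a sliding-window scan over 4-long slices (alternative decomposition, same cost).


-- ===== PORT A =====
-- the for-loop with the 'streak' accumulator and early return, as structural recursion
def goA_checkStreakOf4 (g : Int) : List Int → Int → Bool
  | [], _ => false
  | cell :: rest, streak =>
    if cell == g then
      (if streak + 1 == 4 then true else goA_checkStreakOf4 g rest (streak + 1))
    else goA_checkStreakOf4 g rest 0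

def checkStreakOf4 (partOfBoard : List Int) (gamePiece : Int) : Bool :=
  goA_checkStreakOf4 gamePiece partOfBoard 0

-- ===== PORT B =====
def checkStreakOf4_alt (partOfBoard : List Int) (gamePiece : Int) : Bool :=
  let target := List.replicate 4 gamePiece
  (PySem.List.pyRange 0 ((partOfBoard.length : Int) - 3) 1).any
    (fun i => PySem.List.slice partOfBoard (some i) (some (i + 4)) == target)

-- ===== PRECONDITION & SPEC =====
def Spec_checkStreakOf4 (partOfBoard : List Int) (gamePiece : Int) (out : Bool) : Prop := out = checkStreakOf4_alt partOfBoard gamePiece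
instance (partOfBoard : List Int) (gamePiece : Int) (out : Bool) : Decidable (Spec_checkStreakOf4 partOfBoard gamePiece out) := by unfold Spec_checkStreakOf4; infer_instance

-- ===== CLAIM (what is proved, stated in full; the proofs are below) =====
def Claim_equal_checkStreakOf4 : Prop := ∀ (partOfBoard : List Int) (gamePiece : Int), Dom_checkStreakOf4 partOfBoard gamePiece → Spec_checkStreakOf4 partOfBoard gamePiece (checkStreakOf4 partOfBoard gamePiece)

-- ===== LEMMAS AND PROOFS =====

-- proof-side restatement of the window scan, structurally over the list
def goB (g : Int) : List Int → Bool
  | [] => false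
  | c :: rest => ((c :: rest).take 4 == List.replicate 4 g) || goB g rest

theorem goB_iff (g : Int) (xs : List Int) :
    goB g xs = true ↔ ∃ j : ℕ, (xs.drop j).take 4 = List.replicate 4 g := by
  induction xs with
  | nil =>
    simp [goB]
  | cons c rest ih =>
    simp [goB, ih]
    constructor
    · rintro (h | ⟨j, h⟩)
      · exact ⟨0, by simpa using h⟩
      · exact ⟨j + 1, by simpa using h⟩
    · rintro ⟨j, h⟩
      cases j with
      | zero => exact Or.inl (by simpa using h)
      | succ j => exact Or.inr ⟨j, by simpa using h⟩

theorem window_len {g : Int} {xs : List Int} {j : ℕ}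
    (h : (xs.drop j).take 4 = List.replicate 4 g) : j + 4 ≤ xs.length := by
  have := congrArg List.length h
  simp at this
  omega

theorem alt_eq_goB (xs : List Int) (g : Int) :
    checkStreakOf4_alt xs g = goB g xs := by
  rcases Bool.eq_false_or_eq_true (goB g xs) with h | h
  · rw [h]
    rw [goB_iff] at h
    obtain ⟨j, hj⟩ := h
    have hlen := window_len hj
    simp only [checkStreakOf4_alt, List.any_eq_true]
    refine ⟨(j : Int), ?_, ?_⟩
    · rw [PySem.List.mem_pyRange_one]
      constructor
      · exact Int.natCast_nonneg j
      · omega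
    · rw [beq_iff_eq, PySem.List.slice_toNat xs (Int.natCast_nonneg j) (by omega)]
      have h1 : ((j : Int)).toNat = j := by omega
      have h2 : ((j : Int) + 4).toNat - j = 4 := by omega
      rw [h1, h2]
      exact hj
  · rw [h]
    rw [Bool.eq_false_iff] at h ⊢
    intro hx
    apply h
    rw [goB_iff]
    simp only [checkStreakOf4_alt, List.any_eq_true] at hx
    obtain ⟨i, hmem, heq⟩ := hx
    rw [PySem.List.mem_pyRange_one] at hmem
    obtain ⟨h0, _⟩ := hmem
    rw [beq_iff_eq, PySem.List.slice_toNat xs h0 (by omega)] at heq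
    refine ⟨i.toNat, ?_⟩
    have h4 : (i + 4).toNat - i.toNat = 4 := by omega
    rwa [h4] at heq

theorem goB_absorb (g : Int) (xs : List Int) :
    ((xs.take 4 == List.replicate 4 g) || goB g xs) = goB g xs := by
  cases xs with
  | nil =>
    simp [goB]
  | cons c rest =>
    rw [goB]
    rcases Bool.eq_false_or_eq_true ((c :: rest).take 4 == List.replicate 4 g) with h | h <;>
      rw [h] <;> simp

theorem take_replicate_of_take (g : Int) (rest : List Int) (k : ℕ) (hk : k ≤ 3)
    (h : rest.take 3 = List.replicate 3 g) : rest.take k = List.replicate k g := by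
  have : rest.take k = (rest.take 3).take k := by
    rw [List.take_take]
    congr 1
    omega
  rw [this, h, List.take_replicate]
  congr 1
  omega

theorem goA_eq (g : Int) (xs : List Int) :
    ∀ s : Int, 0 ≤ s → s ≤ 3 →
      goA_checkStreakOf4 g xs s
        = ((xs.take (4 - s).toNat == List.replicate (4 - s).toNat g) || goB g xs) := by
  induction xs with
  | nil =>
    intro s h0 h3
    simp [goA_checkStreakOf4, goB]
    omega
  | cons c rest ih =>
    intro s h0 h3
    rw [goA_checkStreakOf4]
    by_cases hc : c = g
    · subst hc
      simp only [beq_self_eq_true, if_true]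
      by_cases hs : s + 1 = 4
      · have hs3 : s = 3 := by omega
        subst hs3
        show true = _
        have h1 : ((4 : Int) - 3).toNat = 1 := by decide
        rw [h1]
        simp
      · have hne : (s + 1 == (4:Int)) = false := by
          simpa [beq_iff_eq] using hs
        rw [hne, if_neg (by simp)]
        rw [ih (s + 1) (by omega) (by omega)]
        have h4 : (4 - s).toNat = (4 - (s + 1)).toNat + 1 := by omega
        rw [h4]
        have htake : (c :: rest).take ((4 - (s + 1)).toNat + 1)
            = c :: rest.take (4 - (s + 1)).toNat := by simp
        rw [htake, List.replicate_succ]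
        have hhead : ((c :: rest.take (4 - (s + 1)).toNat)
              == c :: List.replicate (4 - (s + 1)).toNat c)
            = (rest.take (4 - (s + 1)).toNat == List.replicate (4 - (s + 1)).toNat c) := by
          simp [List.cons_beq_cons]
        rw [hhead, goB]
        -- absorb the 4-window at the head into the (4 - (s+1))-prefix disjunct
        rcases Bool.eq_false_or_eq_true ((c :: rest).take 4 == List.replicate 4 c) with hw | hw
        · rw [hw]
          rw [beq_iff_eq] at hw
          have hw' : rest.take 3 = List.replicate 3 c := by
            have ht : (c :: rest).take 4 = c :: rest.take 3 := by simp
            rw [ht, show (List.replicate 4 c) = c :: List.replicate 3 c from rfl] at hw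
            exact (List.cons.injEq _ _ _ _ ▸ hw).2
          have hp : rest.take (4 - (s + 1)).toNat = List.replicate (4 - (s + 1)).toNat c :=
            take_replicate_of_take c rest _ (by omega) hw'
          simp [hp]
        · rw [hw]; simp
    · have hcb : (c == g) = false := by simpa [beq_iff_eq] using hc
      rw [hcb, if_neg (by simp)]
      rw [ih 0 le_rfl (by omega)]
      have h40 : ((4 : Int) - 0).toNat = 4 := by decide
      rw [h40, goB_absorb]
      have hpref : ((c :: rest).take (4 - s).toNat == List.replicate (4 - s).toNat g) = false := by
        have hpos : (4 - s).toNat = ((4 - s).toNat - 1) + 1 := by omega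
        rw [hpos]
        simp [List.replicate_succ, List.cons_beq_cons, hcb]
      rw [hpref, Bool.false_or, goB]
      have hw : ((c :: rest).take 4 == List.replicate 4 g) = false := by
        simp [List.replicate_succ, List.cons_beq_cons, hcb]
      rw [hw, Bool.false_or]

-- ===== VERDICT (by name: the statement is the Claim_ definition above) =====
theorem checkStreakOf4_spec : Claim_equal_checkStreakOf4 := by
  intro xs g _
  show checkStreakOf4 xs g = checkStreakOf4_alt xs g
  rw [checkStreakOf4, alt_eq_goB, goA_eq g xs 0 le_rfl (by omega)]
  have h40 : ((4 : Int) - 0).toNat = 4 := by decide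
  rw [h40, goB_absorb]
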